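-- pv_equiv track=rewrite | github.com/igred8/adventofcode | run/10_code.py | draw_sprite
-- ===== SOURCE A (Python) =====
-- def draw_sprite( signal:list ):
--     screen_width = 40
--     screen_height = 6
--     screen2d = []
--     for j in range(screen_height):
--         start = j*screen_width
--         end = start + screen_width
--         rowstr = ''
--         for i,s in enumerate(signal[start:end]):
--             if i in [s-1, s, s+1]:
--                 c = '#'
--             else:
--                 c = '.'
--             rowstr += c
--         screen2d.append( rowstr )
--     return screen2d
-- ===== SOURCE B (Python) =====
-- def draw_sprite(sig):
--     pixels = []
--     for idx, s in enumerate(sig):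
--         pixels.append('#' if idx % 40 in [s - 1, s, s + 1] else '.')
--     px = ''.join(pixels)
--     return [px[k:k + 40] for k in range(0, 240, 40)]
-- ===== Notes on version B (the rewrite author's own statement) =====
-- stated objective: simpler
-- what changed: One flat pass over the signal building a single pixel sequence with col = idx % 40, then a fixed-stride reshape into six 40-character rows, instead of A's nested per-row loops over slices.
import Mathlib
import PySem

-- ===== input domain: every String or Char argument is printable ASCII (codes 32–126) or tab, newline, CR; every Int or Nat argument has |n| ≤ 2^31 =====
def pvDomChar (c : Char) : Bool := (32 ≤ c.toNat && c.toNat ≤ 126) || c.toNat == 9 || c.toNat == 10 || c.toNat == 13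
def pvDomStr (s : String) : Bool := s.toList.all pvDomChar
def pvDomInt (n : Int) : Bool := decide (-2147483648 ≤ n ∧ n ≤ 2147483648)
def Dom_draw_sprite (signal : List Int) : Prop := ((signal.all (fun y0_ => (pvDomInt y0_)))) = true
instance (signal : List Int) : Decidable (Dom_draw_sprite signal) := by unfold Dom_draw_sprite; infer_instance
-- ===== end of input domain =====

-- B replaces A's six per-row loops over slices by one flat pass (col = idx % 40) and a
-- fixed-stride reshape; objective: simpler. Strings are built as List Char and wrapped
-- with String.ofList (PySem strings are defined over List Char).

-- ===== PORT A =====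
def draw_sprite (signal : List Int) : List String :=
  let screen_width : Int := 40
  let screen_height : Int := 6
  (PySem.List.pyRange 0 screen_height 1).foldl (fun screen2d j =>
    let start := j * screen_width
    let stop := start + screen_width
    let rowstr := (PySem.List.enumerate (PySem.List.slice signal (some start) (some stop))).foldl
      (fun rowstr p =>
        rowstr ++ [if p.1 ∈ [p.2 - 1, p.2, p.2 + 1] then '#' else '.']) ([] : List Char)
    screen2d ++ [String.ofList rowstr]) []

-- ===== PORT B =====
def draw_sprite_alt (signal : List Int) : List String :=
  let pixels := (PySem.List.enumerate signal).foldl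
    (fun px p =>
      let col := PySem.Int.mod p.1 40
      px ++ [if col ∈ [p.2 - 1, p.2, p.2 + 1] then '#' else '.']) ([] : List Char)
  (PySem.List.pyRange 0 240 40).map
    (fun k => String.ofList (PySem.List.slice pixels (some k) (some (k + 40))))

-- ===== PRECONDITION & SPEC =====
def Spec_draw_sprite (signal : List Int) (out : List String) : Prop := out = draw_sprite_alt signal
instance (signal : List Int) (out : List String) : Decidable (Spec_draw_sprite signal out) := by unfold Spec_draw_sprite; infer_instance

-- ===== CLAIM (what is proved, stated in full; the proofs are below) =====
def Claim_equal_draw_sprite : Prop := ∀ (signal : List Int), Dom_draw_sprite signal → Spec_draw_sprite signal (draw_sprite signal)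

-- ===== LEMMAS AND PROOFS =====

-- the per-pixel rule of A (local column) and of B (global index, reduced mod 40)
def pvPcA (p : Int × Int) : Char := if p.1 ∈ [p.2 - 1, p.2, p.2 + 1] then '#' else '.'
def pvPcB (p : Int × Int) : Char :=
  if PySem.Int.mod p.1 40 ∈ [p.2 - 1, p.2, p.2 + 1] then '#' else '.'

-- a row of A equals the corresponding 40-wide window of B's flat pixel map
theorem pvRow_eq (signal : List Int) (j : Nat) :
    (PySem.List.enumerate ((signal.drop (40 * j)).take 40) 0).map pvPcA
      = (((PySem.List.enumerate signal 0).map pvPcB).drop (40 * j)).take 40 := by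
  apply List.ext_getElem
  · simp [PySem.List.length_enumerate]
  · intro i h1 h2
    have hlen : i < ((signal.drop (40 * j)).take 40).length := by
      simpa [PySem.List.length_enumerate] using h1
    have hi40 : i < 40 := lt_of_lt_of_le hlen (by simp)
    have hglob : 40 * j + i < signal.length := by
      simp at hlen; omega
    have h3 : i < (PySem.List.enumerate signal 0).length := by
      simp [PySem.List.length_enumerate]; omega
    simp only [List.getElem_map, List.getElem_take, List.getElem_drop,
      PySem.List.getElem_enumerate, pvPcA, pvPcB]
    have hmod : PySem.Int.mod (0 + ((40 * j + i : Nat) : Int)) 40 = (0 + (i : Int)) := by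
      rw [PySem.Int.mod_eq_emod_of_pos (by norm_num)]
      push_cast
      omega
    rw [hmod]

theorem draw_sprite_spec_aux (signal : List Int) :
    draw_sprite signal = draw_sprite_alt signal := by
  unfold draw_sprite draw_sprite_alt
  have hfoldB :
      (PySem.List.enumerate signal).foldl
        (fun px p =>
          let col := PySem.Int.mod p.1 40
          px ++ [if col ∈ [p.2 - 1, p.2, p.2 + 1] then '#' else '.']) ([] : List Char)
        = (PySem.List.enumerate signal 0).map pvPcB := by
    simpa [pvPcB] using
      PySem.List.foldl_append_singleton_eq_map pvPcB (PySem.List.enumerate signal 0) []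
  have hfoldA : ∀ (t : List (Int × Int)),
      t.foldl (fun rowstr p =>
        rowstr ++ [if p.1 ∈ [p.2 - 1, p.2, p.2 + 1] then '#' else '.']) ([] : List Char)
        = t.map pvPcA := by
    intro t
    simpa [pvPcA] using PySem.List.foldl_append_singleton_eq_map pvPcA t []
  simp only [hfoldB]
  have hrange6 : PySem.List.pyRange 0 6 1 = ([0, 1, 2, 3, 4, 5] : List Int) := by decide
  have hrange240 : PySem.List.pyRange 0 240 40 = ([0, 40, 80, 120, 160, 200] : List Int) := by
    decide
  simp only [hrange6, hrange240, List.foldl_cons, List.foldl_nil, List.map_cons,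
    List.map_nil, hfoldA, List.nil_append, List.append_assoc, List.singleton_append]
  have hs : ∀ (j : Nat), j < 6 →
      PySem.List.slice signal (some ((j : Int) * 40)) (some ((j : Int) * 40 + 40))
        = (signal.drop (40 * j)).take 40 := by
    intro j hj
    rw [PySem.List.slice_toNat signal (by positivity) (by positivity)]
    have h1 : ((j : Int) * 40).toNat = 40 * j := by omega
    have h2 : ((j : Int) * 40 + 40).toNat = 40 * j + 40 := by omega
    rw [h1, h2]
    congr 1
    omega
  have hp : ∀ (j : Nat), j < 6 →
      PySem.List.slice ((PySem.List.enumerate signal 0).map pvPcB)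
          (some ((40 : Int) * j)) (some ((40 : Int) * j + 40))
        = (((PySem.List.enumerate signal 0).map pvPcB).drop (40 * j)).take 40 := by
    intro j hj
    rw [PySem.List.slice_toNat _ (by positivity) (by positivity)]
    have h1 : ((40 : Int) * j).toNat = 40 * j := by omega
    have h2 : ((40 : Int) * j + 40).toNat = 40 * j + 40 := by omega
    rw [h1, h2]
    congr 1
    omega
  have key : ∀ (j : Nat), j < 6 →
      (PySem.List.enumerate
          (PySem.List.slice signal (some ((j : Int) * 40)) (some ((j : Int) * 40 + 40))) 0).map
            pvPcA
        = PySem.List.slice ((PySem.List.enumerate signal 0).map pvPcB)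
            (some ((40 : Int) * j)) (some ((40 : Int) * j + 40)) := by
    intro j hj
    rw [hs j hj, hp j hj, pvRow_eq]
  have k0 := key 0 (by norm_num)
  have k1 := key 1 (by norm_num)
  have k2 := key 2 (by norm_num)
  have k3 := key 3 (by norm_num)
  have k4 := key 4 (by norm_num)
  have k5 := key 5 (by norm_num)
  norm_num at k0 k1 k2 k3 k4 k5 ⊢
  rw [k0, k1, k2, k3, k4, k5]
  exact ⟨rfl, rfl, rfl, rfl, rfl, rfl⟩

-- ===== VERDICT (by name: the statement is the Claim_ definition above) =====
theorem draw_sprite_spec : Claim_equal_draw_sprite := by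
  intro signal _
  unfold Spec_draw_sprite
  exact draw_sprite_spec_aux signal
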